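-- pv_equiv track=rewrite | github.com/elene227/programming-Hw-Cw | Day 92/classwork/classwork3.py | count_red_beads
-- ===== SOURCE A (Python) =====
-- def count_red_beads(n):
--     count = 0
--     if n <= 2:
--         return 0
--     elif n > 2:
--         while n - 1:
--             n -= 1
--             count += 2
--     return count
-- ===== SOURCE B (Python) =====
-- def count_red_beads(n):
--     # closed form: the loop adds 2 exactly (n-1) times when n > 2
--     return 2 * (n - 1) if n > 2 else 0
-- ===== Notes on version B (the rewrite author's own statement) =====
-- stated objective: faster
-- what changed: Replaced the decrement-and-count while loop with the closed form 2*(n-1) for n>2, else 0.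
import Mathlib
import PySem

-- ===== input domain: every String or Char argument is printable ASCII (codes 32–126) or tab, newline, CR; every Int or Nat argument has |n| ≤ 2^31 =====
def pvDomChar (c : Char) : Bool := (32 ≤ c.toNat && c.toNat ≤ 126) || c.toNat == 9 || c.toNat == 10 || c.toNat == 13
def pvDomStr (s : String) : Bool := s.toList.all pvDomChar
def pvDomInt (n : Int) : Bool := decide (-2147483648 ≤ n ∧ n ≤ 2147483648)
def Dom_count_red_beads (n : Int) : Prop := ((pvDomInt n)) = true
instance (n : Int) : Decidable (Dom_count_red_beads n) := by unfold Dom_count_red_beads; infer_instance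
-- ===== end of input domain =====

-- B replaces A's O(n) decrement-and-count loop by the closed form 2*(n-1) (faster, asymptotic).

-- ===== PORT A =====
-- the while loop of A: fuel bounds the iterations (fuel = n.toNat suffices for n > 2,
-- where the loop runs n-1 times); the loop body is transcribed step for step
def countRedLoop : Nat → Int → Int → Int
  | 0, _, count => count
  | fuel + 1, n, count =>
    if n - 1 ≠ 0 then countRedLoop fuel (n - 1) (count + 2) else count

def count_red_beads (n : Int) : Int :=
  if n ≤ 2 then 0
  else if n > 2 then countRedLoop n.toNat n 0
  else 0

-- ===== PORT B =====
def count_red_beads_alt (n : Int) : Int :=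
  if n > 2 then 2 * (n - 1) else 0

-- ===== PRECONDITION & SPEC =====
def Spec_count_red_beads (n : Int) (out : Int) : Prop := out = count_red_beads_alt n
instance (n : Int) (out : Int) : Decidable (Spec_count_red_beads n out) := by unfold Spec_count_red_beads; infer_instance

-- ===== CLAIM (what is proved, stated in full; the proofs are below) =====
def Claim_equal_count_red_beads : Prop := ∀ (n : Int), Dom_count_red_beads n → Spec_count_red_beads n (count_red_beads n)

-- ===== LEMMAS AND PROOFS =====
theorem countRedLoop_eq (fuel : Nat) : ∀ (n count : Int), 1 ≤ n → n.toNat ≤ fuel + 1 →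
    countRedLoop fuel n count = count + 2 * (n - 1) := by
  induction fuel with
  | zero =>
    intro n count h1 h2
    have : n = 1 := by omega
    subst this
    simp [countRedLoop]
  | succ f ih =>
    intro n count h1 h2
    by_cases h : n - 1 = 0
    · have : n = 1 := by omega
      subst this
      simp [countRedLoop]
    · have h1' : 1 ≤ n - 1 := by omega
      have h2' : (n - 1).toNat ≤ f + 1 := by omega
      simp only [countRedLoop, if_pos h]
      rw [ih (n - 1) (count + 2) h1' h2']
      ring

-- ===== VERDICT (by name: the statement is the Claim_ definition above) =====
theorem count_red_beads_spec : Claim_equal_count_red_beads := by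
  intro n _
  unfold Spec_count_red_beads count_red_beads count_red_beads_alt
  by_cases h : n ≤ 2
  · simp [h, show ¬ n > 2 by omega]
  · have h3 : n > 2 := by omega
    simp only [if_neg h, if_pos h3]
    rw [countRedLoop_eq n.toNat n 0 (by omega) (by omega)]
    ring
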